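-- pv_equiv track=rewrite | github.com/kefolen/Perudo | sim/perudo.py | legal_bids_after
-- ===== SOURCE A (Python) =====
-- import math
--
-- def legal_bids_after(current_bid, cap_qty):
--     if current_bid is None:
--         # First bet can be any valid bid
--         for q in range(1, cap_qty + 1):
--             for f in range(1, 7):
--                 yield (q, f)
--     else:
--         prev_qty, prev_face = current_bid
--
--         # Handle transitions involving wild 1's
--         for f in range(1, 7):
--             if f == 1:
--                 # Betting on 1's
--                 if prev_face == 1:
--                     # 1's to 1's: normal progression
--                     min_q = prev_qty + 1
--                 else:
--                     # non-1's to 1's: minimum is ceiling(prev_qty / 2)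
--                     min_q = math.ceil(prev_qty / 2)
--             else:
--                 # Betting on non-1's
--                 if prev_face == 1:
--                     # 1's to non-1's: minimum is 2 * prev_qty + 1
--                     min_q = 2 * prev_qty + 1
--                 else:
--                     # non-1's to non-1's: normal progression
--                     if f > prev_face:
--                         min_q = prev_qty  # Same quantity, higher face
--                     else:
--                         min_q = prev_qty + 1  # Same face, higher quantity
--
--             # Generate valid quantities for this face
--             for q in range(min_q, cap_qty + 1):
--                 yield (q, f)
-- ===== SOURCE B (Python) =====
-- def legal_bids_after(current_bid, cap_qty):
--     if current_bid is None:
--         # First bet can be any valid bid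
--         for q in range(1, cap_qty + 1):
--             for f in range(1, 7):
--                 yield (q, f)
--     else:
--         pq, pf = current_bid
--
--         def beats(q, f):
--             # True exactly when (q, f) legally raises (pq, pf)
--             if f == 1:
--                 return q > pq if pf == 1 else q >= (pq + 1) // 2
--             if pf == 1:
--                 return q >= 2 * pq + 1
--             return q >= pq if f > pf else q > pq
--
--         # safe lower bound: no legal quantity is below the smallest threshold
--         lo = min(pq, (pq + 1) // 2, 2 * pq + 1)
--         for f in range(1, 7):
--             for q in range(lo, cap_qty + 1):
--                 if beats(q, f):
--                     yield (q, f)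
-- ===== Notes on version B (the rewrite author's own statement) =====
-- stated objective: alternative
-- what changed: Replaces the per-face min_q threshold computation and range-from-threshold with a generate-and-test loop over a single safe quantity range filtered by a boolean legality predicate beats(q,f).
import Mathlib
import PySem

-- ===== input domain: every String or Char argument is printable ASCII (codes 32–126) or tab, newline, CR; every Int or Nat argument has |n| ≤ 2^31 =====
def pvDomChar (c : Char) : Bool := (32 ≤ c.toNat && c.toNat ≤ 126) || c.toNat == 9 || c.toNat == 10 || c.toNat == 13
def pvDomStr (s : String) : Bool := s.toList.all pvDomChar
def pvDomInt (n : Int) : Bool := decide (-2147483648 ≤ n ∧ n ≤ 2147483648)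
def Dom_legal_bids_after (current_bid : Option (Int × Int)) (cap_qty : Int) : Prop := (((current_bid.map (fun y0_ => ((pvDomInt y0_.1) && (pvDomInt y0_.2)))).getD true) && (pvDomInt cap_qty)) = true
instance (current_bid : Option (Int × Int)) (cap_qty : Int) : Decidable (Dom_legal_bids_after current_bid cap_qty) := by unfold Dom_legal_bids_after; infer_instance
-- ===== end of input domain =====

-- B replaces A's per-face min_q/range-from-threshold generation by a generate-and-test
-- loop over one safe quantity range filtered by a legality predicate (alternative decomposition, same cost).


-- ===== PORT A =====
-- math.ceil(prev_qty / 2) is ported as floordiv (prev_qty+1) 2: exact on |prev_qty| ≤ 2^31,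
-- where float division by 2 is exact and ceil(n/2) = (n+1)//2 for every integer n.
def legal_bids_after (current_bid : Option (Int × Int)) (cap_qty : Int) : List (Int × Int) :=
  match current_bid with
  | none =>
      (PySem.List.pyRange 1 (cap_qty + 1) 1).foldl (fun acc q =>
        (PySem.List.pyRange 1 7 1).foldl (fun acc f => acc ++ [(q, f)]) acc) []
  | some (prev_qty, prev_face) =>
      (PySem.List.pyRange 1 7 1).foldl (fun acc f =>
        let min_q : Int :=
          if f = 1 then
            if prev_face = 1 then prev_qty + 1
            else PySem.Int.floordiv (prev_qty + 1) 2
          else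
            if prev_face = 1 then 2 * prev_qty + 1
            else if f > prev_face then prev_qty else prev_qty + 1
        (PySem.List.pyRange min_q (cap_qty + 1) 1).foldl (fun acc q => acc ++ [(q, f)]) acc) []

-- ===== PORT B =====
-- helper of B: the legality predicate beats(q, f)
def pvBeats (pq pf q f : Int) : Bool :=
  if f = 1 then
    (if pf = 1 then decide (q > pq) else decide (q ≥ PySem.Int.floordiv (pq + 1) 2))
  else if pf = 1 then decide (q ≥ 2 * pq + 1)
  else if f > pf then decide (q ≥ pq) else decide (q > pq)

def legal_bids_after_alt (current_bid : Option (Int × Int)) (cap_qty : Int) : List (Int × Int) :=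
  match current_bid with
  | none =>
      (PySem.List.pyRange 1 (cap_qty + 1) 1).foldl (fun acc q =>
        (PySem.List.pyRange 1 7 1).foldl (fun acc f => acc ++ [(q, f)]) acc) []
  | some (pq, pf) =>
      let lo : Int := min pq (min (PySem.Int.floordiv (pq + 1) 2) (2 * pq + 1))
      (PySem.List.pyRange 1 7 1).foldl (fun acc f =>
        (PySem.List.pyRange lo (cap_qty + 1) 1).foldl (fun acc q =>
          if pvBeats pq pf q f then acc ++ [(q, f)] else acc) acc) []

-- ===== PRECONDITION & SPEC =====
def Spec_legal_bids_after (current_bid : Option (Int × Int)) (cap_qty : Int) (out : List (Int × Int)) : Prop := out = legal_bids_after_alt current_bid cap_qty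
instance (current_bid : Option (Int × Int)) (cap_qty : Int) (out : List (Int × Int)) : Decidable (Spec_legal_bids_after current_bid cap_qty out) := by unfold Spec_legal_bids_after; infer_instance

-- ===== CLAIM (what is proved, stated in full; the proofs are below) =====
def Claim_equal_legal_bids_after : Prop := ∀ (current_bid : Option (Int × Int)) (cap_qty : Int), Dom_legal_bids_after current_bid cap_qty → Spec_legal_bids_after current_bid cap_qty (legal_bids_after current_bid cap_qty)

-- ===== LEMMAS AND PROOFS =====

-- filtering a range from `lo` by `m ≤ q` is the range from `m`, provided lo ≤ m
theorem pv_filter_range (lo m hi : Int) (hlo : lo ≤ m) :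
    (PySem.List.pyRange lo hi 1).filter (fun q => decide (m ≤ q)) = PySem.List.pyRange m hi 1 := by
  by_cases hhi : hi ≤ m
  · rw [PySem.List.pyRange_one_eq_nil hhi]
    rw [List.filter_eq_nil_iff]
    intro x hx
    have := (PySem.List.mem_pyRange_one.mp hx).2
    simp
    omega
  · rw [not_le] at hhi
    rw [PySem.List.pyRange_one_append lo m hi hlo (le_of_lt hhi), List.filter_append]
    have h1 : (PySem.List.pyRange lo m 1).filter (fun q => decide (m ≤ q)) = [] := by
      rw [List.filter_eq_nil_iff]
      intro x hx
      have := (PySem.List.mem_pyRange_one.mp hx).2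
      simp
      omega
    have h2 : (PySem.List.pyRange m hi 1).filter (fun q => decide (m ≤ q)) = PySem.List.pyRange m hi 1 := by
      rw [List.filter_eq_self]
      intro x hx
      have := (PySem.List.mem_pyRange_one.mp hx).1
      simpa using this
    rw [h1, h2, List.nil_append]

-- one face segment: A's range-from-threshold fold equals B's generate-and-test fold
theorem pv_seg (lo m hi f : Int) (p : Int → Bool) (hp : ∀ q, p q = decide (m ≤ q))
    (hlo : lo ≤ m) (acc : List (Int × Int)) :
    (PySem.List.pyRange m hi 1).foldl (fun acc q => acc ++ [(q, f)]) acc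
      = (PySem.List.pyRange lo hi 1).foldl (fun acc q => if p q then acc ++ [(q, f)] else acc) acc := by
  rw [PySem.List.foldl_append_singleton_eq_map]
  rw [PySem.List.foldl_append_if]
  rw [show (PySem.List.pyRange lo hi 1).filter p = (PySem.List.pyRange lo hi 1).filter (fun q => decide (m ≤ q)) from by
    congr 1; funext q; exact hp q]
  rw [pv_filter_range lo m hi hlo]

-- pvBeats tests exactly "q ≥ A's min_q"
theorem pv_beats_eq (pq pf q f : Int) :
    pvBeats pq pf q f
      = decide ((if f = 1 then (if pf = 1 then pq + 1 else PySem.Int.floordiv (pq + 1) 2)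
                 else if pf = 1 then 2 * pq + 1
                 else if f > pf then pq else pq + 1) ≤ q) := by
  unfold pvBeats
  split_ifs <;> simp

theorem pv_lo_le (pq pf f : Int) :
    min pq (min (PySem.Int.floordiv (pq + 1) 2) (2 * pq + 1))
      ≤ (if f = 1 then (if pf = 1 then pq + 1 else PySem.Int.floordiv (pq + 1) 2)
         else if pf = 1 then 2 * pq + 1
         else if f > pf then pq else pq + 1) := by
  split_ifs <;> omega

-- ===== VERDICT (by name: the statement is the Claim_ definition above) =====
theorem legal_bids_after_spec : Claim_equal_legal_bids_after := by
  intro cb cap _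
  unfold Spec_legal_bids_after
  cases cb with
  | none => rfl
  | some p =>
    obtain ⟨pq, pf⟩ := p
    show legal_bids_after (some (pq, pf)) cap = legal_bids_after_alt (some (pq, pf)) cap
    unfold legal_bids_after legal_bids_after_alt
    simp only
    apply PySem.List.foldl_congr_mem
    intro acc f _
    exact pv_seg _ _ _ f (fun q => pvBeats pq pf q f) (fun q => pv_beats_eq pq pf q f) (pv_lo_le pq pf f) acc
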